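-- pv_equiv track=rewrite | github.com/gusmezomo/compression-and-encryption | logic/fibonacci.py | split_codewords
-- ===== SOURCE A (Python) =====
-- def split_codewords(bits: str) -> list[str]:
--     codeword_list = []
--     buffer = []
--
--     for i, bit in enumerate(bits):
--         buffer.append(bit)
--         if i > 0 and bit == '1' and bits[i-1] == '1' and len(buffer) > 1:
--             codeword_list.append(''.join(buffer))
--             buffer = []
--     return codeword_list
-- ===== SOURCE B (Python) =====
-- def split_codewords(bits: str) -> list[str]:
--     out = []
--     rest = bits
--     while True:
--         j = rest.find('11')
--         if j == -1:
--             return out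
--         out.append(rest[:j + 2])
--         rest = rest[j + 2:]
-- ===== Notes on version B (the rewrite author's own statement) =====
-- stated objective: faster
-- what changed: Replaces A's index-aware char-by-char buffer accumulation with repeated substring search: find the next terminator with str.find, cut the codeword there, and loop on the remainder.
import Mathlib
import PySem

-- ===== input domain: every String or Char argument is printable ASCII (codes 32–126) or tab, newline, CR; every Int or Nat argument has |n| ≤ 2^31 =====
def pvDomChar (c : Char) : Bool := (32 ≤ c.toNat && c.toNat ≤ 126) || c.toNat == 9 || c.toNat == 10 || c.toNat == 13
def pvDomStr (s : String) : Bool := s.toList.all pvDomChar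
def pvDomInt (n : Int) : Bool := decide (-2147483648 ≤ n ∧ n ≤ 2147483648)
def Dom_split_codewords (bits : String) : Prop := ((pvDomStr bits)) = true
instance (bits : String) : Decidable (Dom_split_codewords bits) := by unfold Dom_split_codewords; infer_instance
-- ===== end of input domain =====

-- B replaces A's index-aware char-by-char buffer loop with repeated substring search:
-- find the next "11", cut there, recurse on the remainder (objective: faster, measured).

-- ===== PORT A =====
-- loop body of A: append bit to buffer, emit the buffer when the condition fires
def stepA (s : List Char) (st : List String × List Char) (p : Int × Char) : List String × List Char :=
  let buffer := st.2 ++ [p.2]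
  if p.1 > 0 ∧ p.2 = '1' ∧ PySem.List.pyGet? s (p.1 - 1) = some '1' ∧ buffer.length > 1
  then (st.1 ++ [String.ofList buffer], ([] : List Char))
  else (st.1, buffer)

def split_codewords (bits : String) : List String :=
  ((PySem.List.enumerate bits.toList 0).foldl (stepA bits.toList) ([], [])).1

-- ===== PORT B =====
-- B's while-loop: j = rest.find('11'); stop at -1, else emit rest[:j+2] and continue with rest[j+2:]
def splitAux (rest : List Char) (out : List String) : List String :=
  let j := PySem.Chars.find rest ['1','1']
  if h : j = -1 then out
  else splitAux (PySem.List.slice rest (some (j + 2)) none)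
         (out ++ [String.ofList (PySem.List.slice rest none (some (j + 2)))])
termination_by rest.length
decreasing_by
  have hnn : 0 ≤ PySem.Chars.find rest ['1','1'] :=
    (PySem.Chars.find_nonneg_iff rest ['1','1']).2
      ((PySem.Chars.find_ne_neg_one_iff rest ['1','1']).1 h)
  have hspec := PySem.Chars.find_spec hnn
  have hlen : 2 ≤ rest.length - (PySem.Chars.find rest ['1','1']).toNat := by
    simpa using hspec.1.length_le
  rw [PySem.List.slice_from rest
    (show (0:Int) ≤ PySem.Chars.find rest ['1','1'] + 2 by omega)]
  simp only [List.length_drop]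
  omega

def split_codewords_alt (bits : String) : List String := splitAux bits.toList []

-- ===== PRECONDITION & SPEC =====
def Spec_split_codewords (bits : String) (out : List String) : Prop := out = split_codewords_alt bits
instance (bits : String) (out : List String) : Decidable (Spec_split_codewords bits out) := by unfold Spec_split_codewords; infer_instance

-- ===== CLAIM (what is proved, stated in full; the proofs are below) =====
def Claim_equal_split_codewords : Prop := ∀ (bits : String), Dom_split_codewords bits → Spec_split_codewords bits (split_codewords bits)

-- ===== LEMMAS AND PROOFS =====

-- the first occurrence of "11" in s is at m if there is one at m and none earlier
theorem find_eq_of (s sub : List Char) (m : Nat) (h1 : sub <+: s.drop m)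
    (h2 : ∀ i < m, ¬ sub <+: s.drop i) : PySem.Chars.find s sub = (m : Int) := by
  have hin : sub <:+: s := by
    exact (PySem.Chars.isIn_iff_infix sub s).1
      ((PySem.Chars.exists_prefix_drop_iff_isIn sub s).1 ⟨m, h1⟩)
  have hnn : 0 ≤ PySem.Chars.find s sub := (PySem.Chars.find_nonneg_iff s sub).2 hin
  have hspec := PySem.Chars.find_spec hnn
  have heq : (PySem.Chars.find s sub).toNat = m := by
    rcases lt_trichotomy (PySem.Chars.find s sub).toNat m with h | h | h
    · exact absurd hspec.1 (h2 _ h)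
    · exact h
    · exact absurd h1 (hspec.2 m h)
  omega

-- an occurrence of "11" in xs ++ [c] is inside xs or spans the boundary
theorem infix_concat_cases (xs : List Char) (c : Char)
    (h : ['1','1'] <:+: (xs ++ [c])) :
    ['1','1'] <:+: xs ∨ (xs.getLast? = some '1' ∧ c = '1') := by
  rcases h with ⟨l, r, hlr⟩
  rcases r.eq_nil_or_concat with rfl | ⟨r₀, rl, rfl⟩
  · right
    simp only [List.append_nil] at hlr
    have : (l ++ ['1']) ++ ['1'] = xs ++ [c] := by simpa using hlr
    have h1 : l ++ ['1'] = xs := by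
      have := List.append_inj' this rfl
      exact this.1
    have h2 : c = '1' := by
      have := List.append_inj' this rfl
      simpa using this.2.symm
    constructor
    · rw [← h1]; simp
    · exact h2
  · left
    have : (l ++ ['1','1'] ++ r₀) ++ [rl] = xs ++ [c] := by
      simpa using hlr
    have h1 : l ++ ['1','1'] ++ r₀ = xs := (List.append_inj' this rfl).1
    exact ⟨l, r₀, h1⟩

-- a prefix occurrence inside the left part of an append stays in the left part
theorem prefix_drop_append {α : Type} (x y sub : List α) (i : Nat)
    (h : sub <+: (x ++ y).drop i) (hle : i + sub.length ≤ x.length) :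
    sub <+: x.drop i := by
  rw [List.prefix_iff_eq_take] at h ⊢
  rw [List.drop_append_of_le_length (by omega)] at h
  rw [List.take_append_of_le_length (by simp; omega)] at h
  exact h

-- the character of s just before the loop index is the last character of the buffer
theorem pyGet_at (q b₀ : List Char) (lc : Char) (rest : List Char) :
    PySem.List.pyGet? (q ++ (b₀ ++ [lc]) ++ rest)
      (((q.length + (b₀ ++ [lc]).length : Nat) : Int) - 1) = some lc := by
  have h1 : ((q.length + (b₀ ++ [lc]).length : Nat) : Int) - 1
      = ((q.length + b₀.length : Nat) : Int) := by simp; ring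
  have h2 : q ++ (b₀ ++ [lc]) ++ rest = (q ++ b₀) ++ (lc :: rest) := by simp
  rw [h1, PySem.List.pyGet?_natCast, h2,
    List.getElem?_append_right (by simp)]
  simp

-- core invariant: running A's loop over the remaining suffix t with current buffer buf
-- (which contains no "11") produces exactly B's splitting of buf ++ t
theorem loopA_eq (s : List Char) : ∀ (t q buf : List Char) (acc : List String),
    s = q ++ buf ++ t →
    ¬ (['1','1'] <:+: buf) →
    ((PySem.List.enumerate t ((q.length + buf.length : Nat) : Int)).foldl (stepA s) (acc, buf)).1
      = splitAux (buf ++ t) acc := by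
  intro t
  induction t with
  | nil =>
    intro q buf acc hs hb
    rw [splitAux]
    simp [PySem.Chars.find_eq_neg_one_iff, hb, PySem.List.enumerate]
  | cons c t' ih =>
    intro q buf acc hs hb
    rw [PySem.List.enumerate_cons, List.foldl_cons]
    by_cases hD : buf ≠ [] ∧ c = '1' ∧ buf.getLast? = some '1'
    · -- the condition fires: A emits buffer ++ [c], B cuts at the same "11"
      obtain ⟨hbne, hc, hlast⟩ := hD
      subst hc
      obtain ⟨b₀, rfl⟩ : ∃ b₀, buf = b₀ ++ ['1'] := by
        rcases buf.eq_nil_or_concat with rfl | ⟨b₀, lc, rfl⟩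
        · exact absurd rfl hbne
        · have hlc : lc = '1' := by simpa using hlast
          exact ⟨b₀, by simp [hlc]⟩
      have hstep : stepA s (acc, b₀ ++ ['1'])
            (((q.length + (b₀ ++ ['1']).length : Nat) : Int), '1')
          = (acc ++ [String.ofList ((b₀ ++ ['1']) ++ ['1'])], []) := by
        unfold stepA
        rw [if_pos]
        refine ⟨by push_cast; simp; omega, rfl, ?_, by simp⟩
        rw [hs]
        exact pyGet_at q b₀ '1' ('1' :: t')
      rw [hstep]
      have hidx : (((q.length + (b₀ ++ ['1']).length : Nat) : Int)) + 1
          = (((q ++ b₀ ++ ['1','1']).length + ([] : List Char).length : Nat) : Int) := by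
        simp; ring
      rw [hidx]
      have hrec := ih (q ++ b₀ ++ ['1','1']) [] (acc ++ [String.ofList ((b₀ ++ ['1']) ++ ['1'])])
        (by rw [hs]; simp) (by simp)
      rw [hrec]
      -- now evaluate B on buf ++ c :: t'
      have hre : (b₀ ++ ['1']) ++ '1' :: t' = (b₀ ++ ['1','1']) ++ t' := by
        simp
      rw [hre]
      have hfind : PySem.Chars.find ((b₀ ++ ['1','1']) ++ t') ['1','1'] = (b₀.length : Int) := by
        apply find_eq_of
        · rw [List.drop_append_of_le_length (by simp)]
          simp [List.prefix_iff_eq_take]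
        · intro i hi hpre
          apply hb
          have hpre' : ['1','1'] <+: (b₀ ++ ['1']).drop i := by
            have h2 : (b₀ ++ ['1','1']) ++ t' = (b₀ ++ ['1']) ++ ('1' :: t') := by simp
            rw [h2] at hpre
            exact prefix_drop_append _ _ _ _ hpre (by simp; omega)
          obtain ⟨rr, hrr⟩ := hpre'
          exact ⟨(b₀ ++ ['1']).take i, rr, by
            rw [List.append_assoc, hrr, List.take_append_drop]⟩
      conv_rhs => rw [splitAux]
      simp only [hfind]
      rw [dif_neg (by omega)]
      have hb2 : ((b₀.length : Int) + 2) = ((b₀.length + 2 : Nat) : Int) := by push_cast; ring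
      rw [hb2, PySem.List.slice_to _ (by omega), PySem.List.slice_from _ (by omega)]
      simp only [Int.toNat_natCast]
      rw [List.take_left' (by simp), List.drop_left' (by simp)]
      simp
    · -- the condition does not fire: A extends the buffer, B sees the same string
      have hstep : stepA s (acc, buf) (((q.length + buf.length : Nat) : Int), c)
          = (acc, buf ++ [c]) := by
        unfold stepA
        rw [if_neg]
        rintro ⟨h1, h2, h3, h4⟩
        rcases buf.eq_nil_or_concat with rfl | ⟨b₀, lc, rfl⟩
        · simp at h4
        · rw [List.concat_eq_append] at hs
          simp only [List.concat_eq_append] at h3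
          have h5 : PySem.List.pyGet? s
              (((q.length + (b₀ ++ [lc]).length : Nat) : Int) - 1) = some '1' := h3
          have h6 := pyGet_at q b₀ lc (c :: t')
          rw [← hs] at h6
          rw [h6] at h5
          have hlc : lc = '1' := by simpa using h5
          exact hD ⟨by simp, h2, by simp [hlc]⟩
      rw [hstep]
      have hidx : (((q.length + buf.length : Nat) : Int)) + 1
          = ((q.length + (buf ++ [c]).length : Nat) : Int) := by
        simp; ring
      rw [hidx]
      have hb' : ¬ (['1','1'] <:+: (buf ++ [c])) := by
        intro hinf
        rcases infix_concat_cases buf c hinf with h | ⟨hl, hc⟩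
        · exact hb h
        · exact hD ⟨by rintro rfl; simp at hl, hc, hl⟩
      have hrec := ih q (buf ++ [c]) acc (by rw [hs]; simp) hb'
      rw [hrec]
      simp

-- ===== VERDICT (by name: the statement is the Claim_ definition above) =====
theorem split_codewords_spec : Claim_equal_split_codewords := by
  intro bits _
  unfold Spec_split_codewords split_codewords split_codewords_alt
  have := loopA_eq bits.toList bits.toList [] [] [] (by simp) (by simp)
  simpa using this
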